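-- pv_equiv track=rewrite | github.com/hanifadn/dsa-codewars | Python/3kyu/battleship-field-validator.py | _has_touching_ships_diagonally
-- ===== SOURCE A (Python) =====
-- Battlefield = list[list[int]]
--
-- GRID_SIZE = 10
--
-- def _has_touching_ships_diagonally(field: Battlefield) -> bool:
--     """Return True if any two ship cells from different ships share a diagonal neighbor."""
--     for row in range(1, GRID_SIZE):
--         for col in range(GRID_SIZE):
--             if not field[row][col]:
--                 continue
--             if col > 0 and field[row - 1][col - 1]:
--                 return True
--             if col < GRID_SIZE - 1 and field[row - 1][col + 1]:
--                 return True
--     return False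
-- ===== SOURCE B (Python) =====
-- GRID_SIZE = 10
--
-- def _row_mask(row):
--     """Encode the first GRID_SIZE cells of a row as a bitmask of occupied columns."""
--     m = 0
--     for c, v in enumerate(row[:GRID_SIZE]):
--         if v:
--             m |= 1 << c
--     return m
--
-- def _has_touching_ships_diagonally(field):
--     """Bitboard approach: encode every row as an occupancy bitmask once, then
--     detect a diagonal contact by AND-ing each mask, shifted one column left and
--     right, against the next row's mask."""
--     masks = [_row_mask(row) for row in field[:GRID_SIZE]]
--     return any(
--         (above << 1) & below or (above >> 1) & below
--         for above, below in zip(masks, masks[1:])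
--     )
-- ===== Notes on version B (the rewrite author's own statement) =====
-- stated objective: alternative
-- what changed: B switches to a bitboard representation: it first compresses each row into an integer occupancy bitmask, then detects diagonal contact purely by bitwise shift-and-AND of adjacent row masks, instead of A's per-cell double loop that inspects each ship cell's up-left/up-right neighbours with index guards.
import Mathlib
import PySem

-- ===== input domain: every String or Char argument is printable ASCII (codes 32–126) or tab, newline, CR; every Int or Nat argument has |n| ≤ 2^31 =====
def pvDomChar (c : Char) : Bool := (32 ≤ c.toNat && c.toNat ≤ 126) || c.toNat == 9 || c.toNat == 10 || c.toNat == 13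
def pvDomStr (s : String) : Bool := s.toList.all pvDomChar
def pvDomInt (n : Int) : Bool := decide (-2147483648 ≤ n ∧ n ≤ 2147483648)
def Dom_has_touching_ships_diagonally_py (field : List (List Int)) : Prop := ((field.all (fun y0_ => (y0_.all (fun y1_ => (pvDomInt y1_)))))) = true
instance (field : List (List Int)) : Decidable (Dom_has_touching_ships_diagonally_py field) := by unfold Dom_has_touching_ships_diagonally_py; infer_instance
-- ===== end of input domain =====

-- B replaces A's per-cell double scan (rows 1..9, looking up-left/up-right with column guards)
-- by a bitboard: each row is compressed into an occupancy bitmask once, and diagonal contact is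
-- detected by shift-and-AND of adjacent row masks; objective: alternative.

-- ===== PORT A =====
-- cell accessor field[r][c] (A only uses it at indices in range under Pre_)
def pvCell (field : List (List Int)) (r c : Int) : Int :=
  PySem.List.pyGetD (PySem.List.pyGetD field r []) c 0

def has_touching_ships_diagonally_py (field : List (List Int)) : Bool :=
  (PySem.List.pyRange 1 10 1).any (fun row =>
    (PySem.List.pyRange 0 10 1).any (fun col =>
      (!(pvCell field row col == 0)) &&
        ((decide (col > 0) && !(pvCell field (row - 1) (col - 1) == 0)) ||
         (decide (col < 9) && !(pvCell field (row - 1) (col + 1) == 0)))))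

-- ===== PORT B =====
-- _row_mask: m |= 1 << c for each truthy cell of row[:10] (enumerate indices are ≥ 0, so .toNat is exact)
def pvRowMask (row : List Int) : Nat :=
  (PySem.List.enumerate (PySem.List.slice row none (some 10)) 0).foldl
    (fun (m : Nat) (p : Int × Int) => if p.2 ≠ 0 then m ||| ((1 : Nat) <<< p.1.toNat) else m) 0

def has_touching_ships_diagonally_py_alt (field : List (List Int)) : Bool :=
  let masks := (PySem.List.slice field none (some 10)).map pvRowMask
  (masks.zip masks.tail).any (fun p =>
    ((p.1 <<< 1) &&& p.2 != 0) || ((p.1 >>> 1) &&& p.2 != 0))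

-- ===== PRECONDITION & SPEC =====
-- Pre_ excludes exactly the inputs on which the Python A raises IndexError: those fields (smaller
-- than the fixed 10x10 grid) where, in A's row-major scan of rows 1..9, an out-of-range access
-- occurs before any diagonal hit would have returned True. pvRaisesAt/pvHitsAt below are the
-- closed-form per-cell descriptions of those two events; Pre_ quantifies them over the 10x10 index box.
def pvRowLen (field : List (List Int)) (r : Int) : Int :=
  ((PySem.List.pyGetD field r []).length : Int)

-- A's visit of cell (row,col) raises: the cell itself, or a diagonal neighbour it consults, is out of range
def pvRaisesAt (field : List (List Int)) (row col : Int) : Bool :=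
  if !decide (col < pvRowLen field row) then true
  else if pvCell field row col == 0 then false
  else if decide (0 < col) && !decide (col - 1 < pvRowLen field (row - 1)) then true
  else if (col == 0 || pvCell field (row - 1) (col - 1) == 0) && decide (col < 9) && !decide (col + 1 < pvRowLen field (row - 1)) then true
  else false

-- A's visit of cell (row,col) returns True: a ship cell with an in-range occupied up-left or up-right neighbour
def pvHitsAt (field : List (List Int)) (row col : Int) : Bool :=
  decide (col < pvRowLen field row) && !(pvCell field row col == 0) &&
    ((decide (0 < col) && decide (col - 1 < pvRowLen field (row - 1)) && !(pvCell field (row - 1) (col - 1) == 0)) ||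
     ((col == 0 || (decide (col - 1 < pvRowLen field (row - 1)) && pvCell field (row - 1) (col - 1) == 0)) &&
        decide (col < 9) && decide (col + 1 < pvRowLen field (row - 1)) && !(pvCell field (row - 1) (col + 1) == 0)))

-- every raising cell is preceded (in row-major order) by a hitting cell, i.e. A returns before it would raise
def pvPreB (field : List (List Int)) : Bool :=
  (PySem.List.pyRange 1 10 1).all fun row =>
    (PySem.List.pyRange 0 10 1).all fun col =>
      !(pvRaisesAt field row col) ||
        ((PySem.List.pyRange 1 10 1).any fun r' =>
          (PySem.List.pyRange 0 10 1).any fun c' =>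
            (decide (r' < row) || (r' == row && decide (c' < col))) && pvHitsAt field r' c')

def Pre_has_touching_ships_diagonally_py (field : List (List Int)) : Prop :=
  pvPreB field = true
instance (field : List (List Int)) : Decidable (Pre_has_touching_ships_diagonally_py field) := by unfold Pre_has_touching_ships_diagonally_py; infer_instance

def pvWitness_has_touching_ships_diagonally_py : List (List Int) :=
  List.replicate 10 (List.replicate 10 (0 : Int))

def Spec_has_touching_ships_diagonally_py (field : List (List Int)) (out : Bool) : Prop := out = has_touching_ships_diagonally_py_alt field
instance (field : List (List Int)) (out : Bool) : Decidable (Spec_has_touching_ships_diagonally_py field out) := by unfold Spec_has_touching_ships_diagonally_py; infer_instance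

-- ===== CLAIM =====
def Claim_equal_has_touching_ships_diagonally_py : Prop := ∀ (field : List (List Int)), Dom_has_touching_ships_diagonally_py field → Pre_has_touching_ships_diagonally_py field → Spec_has_touching_ships_diagonally_py field (has_touching_ships_diagonally_py field)

-- ===== LEMMAS AND PROOFS =====

-- nat-level cell accessor used by the proofs
def pvCellN (field : List (List Int)) (r c : Nat) : Int := (field.getD r []).getD c 0

lemma cell_cast (field : List (List Int)) (r c : Nat) :
    pvCell field (r : Int) (c : Int) = pvCellN field r c := by
  simp [pvCell, pvCellN, PySem.List.pyGetD_natCast]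

lemma portA_iff (field : List (List Int)) :
    has_touching_ships_diagonally_py field = true ↔
      ∃ r c : Int, (1 ≤ r ∧ r < 10) ∧ (0 ≤ c ∧ c < 10) ∧
        pvCell field r c ≠ 0 ∧
        ((0 < c ∧ pvCell field (r - 1) (c - 1) ≠ 0) ∨
         (c < 9 ∧ pvCell field (r - 1) (c + 1) ≠ 0)) := by
  simp [has_touching_ships_diagonally_py, List.any_eq_true, PySem.List.mem_pyRange_one]

lemma foldl_or_testBit (l : List (Int × Int)) (acc : Nat) (j : Nat) :
    ((l.foldl (fun (m : Nat) (p : Int × Int) => if p.2 ≠ 0 then m ||| ((1 : Nat) <<< p.1.toNat) else m) acc).testBit j)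
      = (acc.testBit j || l.any (fun p => decide (p.2 ≠ 0) && decide (p.1.toNat = j))) := by
  induction l generalizing acc with
  | nil => simp
  | cons p l ih =>
      simp only [List.foldl_cons, List.any_cons, ih]
      by_cases h : p.2 = 0
      · simp [h]
      · have : ((1 : Nat) <<< p.1.toNat) = 2 ^ p.1.toNat := by
          simp [Nat.shiftLeft_eq]
        simp [h, this, Nat.testBit_or, Nat.testBit_two_pow]
        by_cases hj : p.1.toNat = j <;> simp [hj, Bool.or_comm]

lemma rowMask_testBit (row : List Int) (j : Nat) :
    (pvRowMask row).testBit j = (decide (j < 10) && decide (row.getD j 0 ≠ 0)) := by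
  have hsl : PySem.List.slice row none (some (10 : Int)) = row.take 10 := by
    simpa using PySem.List.slice_to row (show (0:Int) ≤ 10 by norm_num)
  rw [pvRowMask, hsl, foldl_or_testBit]
  simp only [Nat.zero_testBit, Bool.false_or]
  rw [Bool.eq_iff_iff, List.any_eq_true]
  constructor
  · rintro ⟨p, hp, hcond⟩
    rcases (PySem.List.mem_enumerate_iff _ _ _).1 hp with ⟨k, hk, rfl⟩
    simp only [Bool.and_eq_true, decide_eq_true_eq] at hcond
    have hkj : k = j := by
      have := hcond.2; simp at this; omega
    subst hkj
    have hk10 : k < 10 := by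
      have := List.length_take_le 10 row; omega
    have hkr : k < row.length := by
      have : (row.take 10).length = min 10 row.length := by simp
      omega
    simp only [Bool.and_eq_true, decide_eq_true_eq]
    refine ⟨hk10, ?_⟩
    have : (row.take 10)[k] = row[k] := List.getElem_take
    rw [List.getD_eq_getElem _ _ hkr]
    rw [this] at hcond
    exact hcond.1
  · intro h
    simp only [Bool.and_eq_true, decide_eq_true_eq] at h
    obtain ⟨hj10, hne⟩ := h
    have hjr : j < row.length := by
      by_contra hge
      exact hne (List.getD_eq_default _ _ (by omega))
    have hjt : j < (row.take 10).length := by simp; omega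
    refine ⟨((0 : Int) + j, (row.take 10)[j]), ?_, ?_⟩
    · exact (PySem.List.mem_enumerate_iff _ _ _).2 ⟨j, hjt, rfl⟩
    · have : (row.take 10)[j] = row[j] := List.getElem_take
      rw [List.getD_eq_getElem _ _ hjr] at hne
      simp [this, hne]

lemma land_ne_zero_iff (a b : Nat) :
    a &&& b ≠ 0 ↔ ∃ j, a.testBit j ∧ b.testBit j := by
  constructor
  · intro h
    by_contra hc
    apply h
    apply Nat.eq_of_testBit_eq
    intro j
    simp only [Nat.testBit_and, Nat.zero_testBit]
    by_cases ha : a.testBit j = true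
    · by_cases hb : b.testBit j = true
      · exact absurd ⟨j, ha, hb⟩ hc
      · simp [hb]
    · simp [ha]
  · rintro ⟨j, ha, hb⟩ h0
    have : (a &&& b).testBit j = true := by simp [Nat.testBit_and, ha, hb]
    rw [h0] at this; simp at this

-- masks list facts
lemma masks_len (field : List (List Int)) :
    ((PySem.List.slice field none (some (10:Int))).map pvRowMask).length = min 10 field.length := by
  have hsl : PySem.List.slice field none (some (10 : Int)) = field.take 10 := by
    simpa using PySem.List.slice_to field (show (0:Int) ≤ 10 by norm_num)
  simp [hsl]

lemma masks_get (field : List (List Int)) (i : Nat)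
    (h : i < min 10 field.length) :
    ((PySem.List.slice field none (some (10:Int))).map pvRowMask).getD i 0
      = pvRowMask (field.getD i []) := by
  have hsl : PySem.List.slice field none (some (10 : Int)) = field.take 10 := by
    simpa using PySem.List.slice_to field (show (0:Int) ≤ 10 by norm_num)
  have hi1 : i < field.length := by omega
  have hi2 : i < (field.take 10).length := by simp; omega
  rw [hsl]
  rw [List.getD_eq_getElem _ _ (by simpa using hi2)]
  rw [List.getD_eq_getElem _ _ hi1]
  simp [List.getElem_take]

lemma any_zip_tail (l : List Nat) (p : Nat × Nat → Bool) :
    ((l.zip l.tail).any p) = true ↔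
      ∃ i : Nat, i + 1 < l.length ∧ p (l.getD i 0, l.getD (i+1) 0) = true := by
  rw [List.any_eq_true]
  constructor
  · rintro ⟨q, hq, hpq⟩
    rcases List.mem_iff_getElem.1 hq with ⟨i, hi, rfl⟩
    have hlen : (l.zip l.tail).length = min l.length l.tail.length := List.length_zip
    have hil : i + 1 < l.length := by
      simp [hlen] at hi
      omega
    refine ⟨i, hil, ?_⟩
    have h1 : (l.zip l.tail)[i] = (l[i]'(by omega), l.tail[i]'(by simp; omega)) :=
      List.getElem_zip
    have h2 : l.tail[i]'(by simp; omega) = l[i+1]'hil := List.getElem_tail _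
    rw [h1, h2] at hpq
    rwa [List.getD_eq_getElem _ _ (by omega), List.getD_eq_getElem _ _ hil]
  · rintro ⟨i, hi, hp⟩
    have hiz : i < (l.zip l.tail).length := by
      rw [List.length_zip]; simp; omega
    refine ⟨(l.zip l.tail)[i], List.getElem_mem _, ?_⟩
    have h1 : (l.zip l.tail)[i] = (l[i]'(by omega), l.tail[i]'(by simp; omega)) :=
      List.getElem_zip
    have h2 : l.tail[i]'(by simp; omega) = l[i+1]'hi := List.getElem_tail _
    rw [h1, h2]
    rwa [List.getD_eq_getElem _ _ (by omega), List.getD_eq_getElem _ _ hi] at hp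

lemma cellN_row_lt (field : List (List Int)) (r c : Nat)
    (h : pvCellN field r c ≠ 0) : r < field.length := by
  by_contra hge
  apply h
  unfold pvCellN
  rw [show field.getD r [] = [] from List.getD_eq_default _ _ (by omega)]
  simp

lemma portB_nat_iff (field : List (List Int)) :
    has_touching_ships_diagonally_py_alt field = true ↔
      ∃ r c : Nat, r < 9 ∧ c < 9 ∧
        ((pvCellN field r c ≠ 0 ∧ pvCellN field (r+1) (c+1) ≠ 0) ∨
         (pvCellN field r (c+1) ≠ 0 ∧ pvCellN field (r+1) c ≠ 0)) := by
  unfold has_touching_ships_diagonally_py_alt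
  rw [any_zip_tail]
  constructor
  · rintro ⟨i, hi, hp⟩
    rw [masks_len] at hi
    rw [masks_get field i (by omega), masks_get field (i+1) (by omega)] at hp
    simp only [Bool.or_eq_true, bne_iff_ne, ne_eq] at hp
    rcases hp with h | h
    · rcases (land_ne_zero_iff _ _).1 h with ⟨j, hja, hjb⟩
      rw [Nat.testBit_shiftLeft] at hja
      simp only [Bool.and_eq_true, decide_eq_true_eq] at hja
      obtain ⟨hj1, hja⟩ := hja
      rw [rowMask_testBit] at hja hjb
      simp only [Bool.and_eq_true, decide_eq_true_eq] at hja hjb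
      refine ⟨i, j - 1, by omega, by omega, Or.inl ⟨hja.2, ?_⟩⟩
      have : j - 1 + 1 = j := by omega
      rw [this]
      exact hjb.2
    · rcases (land_ne_zero_iff _ _).1 h with ⟨j, hja, hjb⟩
      rw [Nat.testBit_shiftRight] at hja
      rw [rowMask_testBit] at hja hjb
      simp only [Bool.and_eq_true, decide_eq_true_eq] at hja hjb
      refine ⟨i, j, by omega, by omega, Or.inr ⟨?_, hjb.2⟩⟩
      have : j + 1 = 1 + j := by omega
      rw [this]
      exact hja.2
  · rintro ⟨r, c, hr, hc, h | h⟩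
    · have hrow : r + 1 < field.length := cellN_row_lt field (r+1) (c+1) h.2
      refine ⟨r, by rw [masks_len]; omega, ?_⟩
      rw [masks_get field r (by omega), masks_get field (r+1) (by omega)]
      simp only [Bool.or_eq_true, bne_iff_ne, ne_eq]
      left
      apply (land_ne_zero_iff _ _).2
      refine ⟨c + 1, ?_, ?_⟩
      · rw [Nat.testBit_shiftLeft]
        simp only [Nat.add_sub_cancel, Bool.and_eq_true, decide_eq_true_eq]
        refine ⟨by omega, ?_⟩
        rw [rowMask_testBit]
        simp only [Bool.and_eq_true, decide_eq_true_eq]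
        exact ⟨by omega, h.1⟩
      · rw [rowMask_testBit]
        simp only [Bool.and_eq_true, decide_eq_true_eq]
        exact ⟨by omega, h.2⟩
    · have hrow : r + 1 < field.length := cellN_row_lt field (r+1) c h.2
      refine ⟨r, by rw [masks_len]; omega, ?_⟩
      rw [masks_get field r (by omega), masks_get field (r+1) (by omega)]
      simp only [Bool.or_eq_true, bne_iff_ne, ne_eq]
      right
      apply (land_ne_zero_iff _ _).2
      refine ⟨c, ?_, ?_⟩
      · rw [Nat.testBit_shiftRight, rowMask_testBit]
        simp only [Bool.and_eq_true, decide_eq_true_eq]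
        have : 1 + c = c + 1 := by omega
        rw [this]
        exact ⟨by omega, h.1⟩
      · rw [rowMask_testBit]
        simp only [Bool.and_eq_true, decide_eq_true_eq]
        exact ⟨by omega, h.2⟩

lemma ports_agree (field : List (List Int)) :
    has_touching_ships_diagonally_py field = has_touching_ships_diagonally_py_alt field := by
  rw [Bool.eq_iff_iff, portA_iff, portB_nat_iff]
  constructor
  · rintro ⟨r, c, hr, hc, hP, h | h⟩
    · obtain ⟨hcpos, hUL⟩ := h
      refine ⟨(r - 1).toNat, (c - 1).toNat, by omega, by omega, Or.inl ⟨?_, ?_⟩⟩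
      · rw [← cell_cast]
        have e1 : (((r - 1).toNat : Nat) : Int) = r - 1 := by omega
        have e2 : (((c - 1).toNat : Nat) : Int) = c - 1 := by omega
        rw [e1, e2]; exact hUL
      · rw [← cell_cast]
        have e1 : (((r - 1).toNat + 1 : Nat) : Int) = r := by omega
        have e2 : (((c - 1).toNat + 1 : Nat) : Int) = c := by omega
        rw [e1, e2]; exact hP
    · obtain ⟨hc9, hUR⟩ := h
      refine ⟨(r - 1).toNat, c.toNat, by omega, by omega, Or.inr ⟨?_, ?_⟩⟩
      · rw [← cell_cast]
        have e1 : (((r - 1).toNat : Nat) : Int) = r - 1 := by omega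
        have e2 : ((c.toNat + 1 : Nat) : Int) = c + 1 := by omega
        rw [e1, e2]; exact hUR
      · rw [← cell_cast]
        have e1 : (((r - 1).toNat + 1 : Nat) : Int) = r := by omega
        have e2 : ((c.toNat : Nat) : Int) = c := by omega
        rw [e1, e2]; exact hP
  · rintro ⟨a, b, ha, hb, h | h⟩
    · refine ⟨(a : Int) + 1, (b : Int) + 1, by omega, by omega, ?_, Or.inl ⟨by omega, ?_⟩⟩
      · have e1 : ((a : Int) + 1) = ((a + 1 : Nat) : Int) := by omega
        have e2 : ((b : Int) + 1) = ((b + 1 : Nat) : Int) := by omega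
        rw [e1, e2, cell_cast]; exact h.2
      · have e1 : ((a : Int) + 1 - 1) = ((a : Nat) : Int) := by omega
        have e2 : ((b : Int) + 1 - 1) = ((b : Nat) : Int) := by omega
        rw [e1, e2, cell_cast]; exact h.1
    · refine ⟨(a : Int) + 1, (b : Int), by omega, by omega, ?_, Or.inr ⟨by omega, ?_⟩⟩
      · have e1 : ((a : Int) + 1) = ((a + 1 : Nat) : Int) := by omega
        rw [e1, cell_cast]; exact h.2
      · have e1 : ((a : Int) + 1 - 1) = ((a : Nat) : Int) := by omega
        have e2 : ((b : Int) + 1) = ((b + 1 : Nat) : Int) := by omega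
        rw [e1, e2, cell_cast]; exact h.1

-- ===== VERDICT =====
theorem has_touching_ships_diagonally_py_spec : Claim_equal_has_touching_ships_diagonally_py := by
  intro field _ _
  unfold Spec_has_touching_ships_diagonally_py
  exact ports_agree field
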